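-- pv_equiv track=rewrite | github.com/JH-TT/Coding_Practice | Programmers/Implementation_P/176962.py | solution
-- ===== SOURCE A (Python) =====
-- def solution(plans):
--     answer = []
--     stop = []
--     p = sorted(plans, key = lambda x : x[1]) # 시간순서대로 정렬한다.
--
--     for i in range(len(p)-1):
--         term = calc_time(p[i][1], p[i+1][1]) # 현재 과제 시작부터 다음 과제까지 남은 시간
--         # 만약 현재 과제를 시간안에 충분히 할 수 있으면 answe에 넣는다.
--         if int(p[i][2]) <= term:
--             term -= int(p[i][2]) # 남은시간
--             answer.append(p[i][0])
--         # 만약 과제를 시간안에 해결하지 못하면 stop에 남은시간과 넘긴다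
--         else:
--             stop.append([p[i][0], int(p[i][2]) - term])
--             continue
--         # 시간이 남아있으면 남긴 과제들을 수행한다
--         while stop and term > 0:
--             t = stop[-1][1] - term # 과제 소요시간 - 남은시간
--             # 남은시간안에 과제를 해결하는 경우
--             if t <= 0:
--                 answer.append(stop.pop()[0]) # answer에 넣고
--                 term = -t # term을 업데이트 해준다
--             # 남은시간안에 과제를 해결하지 못하는 경우
--             else:
--                 stop[-1][1] -= term # 과제의 남은 시간을 업데이트하고
--                 break # 반복문을 끝낸다
--
--     answer.append(p[-1][0]) # 가장 늦게 시작한 과제는 남은 과제들보다 먼저 끝난다.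
--     # 남은 과제들은 순서대로 마친다
--     while stop:
--         answer.append(stop.pop()[0])
--
--     return answer
--
-- def calc_time(a, b):
--     a = list(map(int, a.split(":")))
--     b = list(map(int, b.split(":")))
--     return (b[0]*60+b[1]) - (a[0]*60+a[1])
-- ===== SOURCE B (Python) =====
-- def to_min(s):
--     t = list(map(int, s.split(":")))
--     return t[0] * 60 + t[1]
--
-- def solution(plans):
--     p = sorted(plans, key=lambda x: x[1])
--     n = len(p)
--     answer = []
--
--     def exec_task(i, t):
--         # Run task i from time t, recursively running every task that starts
--         # before it finishes; the call stack replaces an explicit pause-stack.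
--         # Returns (first index not started during this execution, completion time).
--         # The latest-starting task can never be preempted, so it completes
--         # immediately relative to the suspended ones; its duration is irrelevant.
--         if i == n - 1:
--             answer.append(p[i][0])
--             return n, t
--         rem = int(p[i][2])
--         j = i + 1
--         while j < n and to_min(p[j][1]) < t + rem:
--             s = to_min(p[j][1])
--             rem -= s - t
--             j, t = exec_task(j, s)
--         answer.append(p[i][0])
--         return j, t + rem
--
--     i = 0
--     while i < n - 1:
--         i, _ = exec_task(i, to_min(p[i][1]))
--     if i == n - 1:
--         answer.append(p[n - 1][0])
--     return answer
-- ===== Notes on version B (the rewrite author's own statement) =====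
-- stated objective: alternative
-- what changed: B replaces A's explicit pause-stack ('stop') and its per-gap pop/charge while-loop by direct recursion in absolute time: exec_task(i, t) runs task i from time t and recursively executes every task that starts before it finishes, so the call stack itself holds the suspended tasks and the completion order falls out of the recursion.
import Mathlib
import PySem

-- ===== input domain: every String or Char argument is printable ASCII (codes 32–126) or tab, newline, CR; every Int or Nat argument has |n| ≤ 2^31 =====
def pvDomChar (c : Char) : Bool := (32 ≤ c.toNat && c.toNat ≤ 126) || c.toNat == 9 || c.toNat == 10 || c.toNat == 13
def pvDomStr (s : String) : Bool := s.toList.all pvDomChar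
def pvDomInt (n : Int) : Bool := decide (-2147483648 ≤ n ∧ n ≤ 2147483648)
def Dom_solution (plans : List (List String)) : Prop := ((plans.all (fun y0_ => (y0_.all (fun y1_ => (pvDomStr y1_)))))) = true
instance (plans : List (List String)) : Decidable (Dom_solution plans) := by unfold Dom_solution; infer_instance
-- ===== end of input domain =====

-- B replaces A's explicit pause-stack and per-gap pop loop by direct recursion:
-- exec_task(i, t) runs task i from absolute time t, recursively executing every
-- task that starts before it finishes (objective: alternative; same cost;
-- return value only, no mutation).

-- ===== PORT A =====
-- helper calc_time: a,b are "H:M" strings; int() on every ':'-part, uses parts 0 and 1.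
-- none = the ValueError/IndexError Python raises on unparseable parts / fewer than 2 parts.
-- (split? with the literal non-empty separator ":" is never none, so .getD [] is exact.)
def calcTimeA? (a b : String) : Option Int :=
  match ((PySem.Str.split? a ":").getD []).mapM PySem.Int.ofStr? with
  | some (a0 :: a1 :: _) =>
    match ((PySem.Str.split? b ":").getD []).mapM PySem.Int.ofStr? with
    | some (b0 :: b1 :: _) => some ((b0 * 60 + b1) - (a0 * 60 + a1))
    | _ => none
  | _ => none

-- A's inner 'while stop and term > 0' loop; the Python list-stack is represented with
-- its TOP as the head. Returns (stop, term, answer) after the loop.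
def whileA (stop : List (String × Int)) (term : Int) (answer : List String) :
    List (String × Int) × Int × List String :=
  match stop with
  | [] => ([], term, answer)
  | (nm, r) :: rest =>
    if 0 < term then
      if r - term ≤ 0 then whileA rest (-(r - term)) (answer ++ [nm])
      else ((nm, r - term) :: rest, term, answer)
    else ((nm, r) :: rest, term, answer)

-- A's 'for i in range(len(p)-1)' over adjacent pairs of the sorted list, then the tail
-- appends.  none = Python raises (empty list / failed parse; x[2] on a short list reads
-- pyGetD's "" default, which int() then rejects exactly like the IndexError).
def loopA : List (List String) → List (String × Int) → List String → Option (List String)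
  | [], _, _ => none
  | [last], stop, answer =>
      some (answer ++ [PySem.List.pyGetD last 0 ""] ++ stop.map Prod.fst)
  | cur :: nxt :: rest, stop, answer =>
    match calcTimeA? (PySem.List.pyGetD cur 1 "") (PySem.List.pyGetD nxt 1 "") with
    | none => none
    | some term =>
      match PySem.Int.ofStr? (PySem.List.pyGetD cur 2 "") with
      | none => none
      | some play =>
        if play ≤ term then
          match whileA stop (term - play) (answer ++ [PySem.List.pyGetD cur 0 ""]) with
          | (stop', _, answer') => loopA (nxt :: rest) stop' answer'
        else
          loopA (nxt :: rest) ((PySem.List.pyGetD cur 0 "", play - term) :: stop) answer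

def solution (plans : List (List String)) : List String :=
  -- sort key x[1] as a code-point list: Python str < is < on .toList (String.lt_iff_toList_lt); pyGetD's "" default only matters outside Pre_ (short entry ⇒ Python raises)
  (loopA (PySem.List.sorted plans (fun x => (PySem.List.pyGetD x 1 "").toList) false) [] []).getD []

-- ===== PORT B =====
-- helper to_min of Source B
def toMinB? (s : String) : Option Int :=
  match ((PySem.Str.split? s ":").getD []).mapM PySem.Int.ofStr? with
  | some (h :: m :: _) => some (h * 60 + m)
  | _ => none

-- p[i][k]; every access Source B makes is guarded in range, where pyGetD is exact
def fldB (p : List (List String)) (i : Nat) (k : Int) : String :=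
  PySem.List.pyGetD (PySem.List.pyGetD p (i : Int) []) k ""

-- Source B's recursive exec_task(i, t) (execGoL) with its inner while-loop (execWhileL).
-- The 'else none' branches are totality guards only: callers always pass i < n and
-- execGoL always returns an index larger than its argument (goBound below).
mutual
def execGoL (p : List (List String)) (n : Nat) (i : Nat) (t : Int) (ans : List String) :
    Option (Nat × Int × List String) :=
  if (i : Int) = (n : Int) - 1 then some (n, t, ans ++ [fldB p i 0])
  else if hi : i < n then
    match PySem.Int.ofStr? (fldB p i 2) with
    | none => none
    | some rem =>
      match execWhileL p n (i + 1) t rem ans with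
      | none => none
      | some (j2, t2, r2, ans2) => some (j2, t2 + r2, ans2 ++ [fldB p i 0])
  else none
termination_by (n - i, 0)
decreasing_by apply Prod.Lex.left; omega
def execWhileL (p : List (List String)) (n : Nat) (j : Nat) (t rem : Int) (ans : List String) :
    Option (Nat × Int × Int × List String) :=
  if hj : j < n then
    match toMinB? (fldB p j 1) with
    | none => none
    | some s =>
      if s < t + rem then
        match execGoL p n j s ans with
        | none => none
        | some (j', t', ans') =>
          if hjj : j < j' then execWhileL p n j' t' (rem - (s - t)) ans'
          else none
      else some (j, t, rem, ans)
  else some (j, t, rem, ans)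
termination_by (n - j, 1)
decreasing_by
  · apply Prod.Lex.right' <;> omega
  · apply Prod.Lex.left; omega
end

-- Source B's top-level 'while i < n - 1' loop (and the final 'if i == n - 1' append);
-- the 'else none' on the guard i < i' is a totality guard only.
def runTopL (p : List (List String)) (n : Nat) (i : Nat) (ans : List String) :
    Option (List String) :=
  if h0 : (i : Int) < (n : Int) - 1 then
    match toMinB? (fldB p i 1) with
    | none => none
    | some t0 =>
      match execGoL p n i t0 ans with
      | none => none
      | some (i', _, ans') =>
        if h : i < i' then runTopL p n i' ans' else none
  else if (i : Int) = (n : Int) - 1 then some (ans ++ [fldB p i 0])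
  else some ans
termination_by n - i
decreasing_by omega

def solution_alt (plans : List (List String)) : List String :=
  let p := PySem.List.sorted plans (fun x => (PySem.List.pyGetD x 1 "").toList) false
  (runTopL p p.length 0 []).getD []

-- ===== PRECONDITION & SPEC =====
-- independent well-formedness tests for Pre_ (not the ports' helpers)
def preTimeOK (x : List String) : Bool :=
  match ((PySem.Str.split? (PySem.List.pyGetD x 1 "") ":").getD []).mapM PySem.Int.ofStr? with
  | some (_ :: _ :: _) => true
  | _ => false

def preFullOK (x : List String) : Bool :=
  preTimeOK x && (PySem.Int.ofStr? (PySem.List.pyGetD x 2 "")).isSome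

-- Pre_ = exactly the inputs where Python A returns: a non-empty list whose entries all
-- have a sort key x[1]; with ≥ 2 plans every x[1] must parse as "H:M" and every entry
-- except the LAST of the stable sort by x[1] must also carry a parseable duration x[2]
-- (A never reads the last-sorted entry's duration).
def Pre_solution (plans : List (List String)) : Prop :=
  plans ≠ [] ∧ (∀ x ∈ plans, 2 ≤ x.length) ∧
  (2 ≤ plans.length →
    (∀ x ∈ plans, preTimeOK x = true) ∧
    (∀ x ∈ (PySem.List.sorted plans (fun x => (PySem.List.pyGetD x 1 "").toList) false).dropLast,
        preFullOK x = true))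
instance (plans : List (List String)) : Decidable (Pre_solution plans) := by
  unfold Pre_solution; infer_instance

def pvWitness_solution : List (List String) :=
  [["b", "02:00", "30"], ["a", "01:00", "90"], ["c", "03:00", "5"]]

def Spec_solution (plans : List (List String)) (out : List String) : Prop := out = solution_alt plans
instance (plans : List (List String)) (out : List String) : Decidable (Spec_solution plans out) := by
  unfold Spec_solution; infer_instance

-- ===== CLAIM (what is proved, stated in full; the proofs are below) =====
def Claim_equal_solution : Prop := ∀ (plans : List (List String)), Dom_solution plans → Pre_solution plans → Spec_solution plans (solution plans)

-- ===== LEMMAS AND PROOFS =====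

-- proof-only intermediate machine M: the uniform push-then-drain stack loop.
-- whileB pops finished tasks off the stack while they fit in 'remain'.
def whileB (stack : List (String × Int)) (remain : Int) (answer : List String) :
    List (String × Int) × List String :=
  match stack with
  | [] => ([], answer)
  | (nm, r) :: rest =>
    if r ≤ remain then whileB rest (remain - r) (answer ++ [nm])
    else ((nm, r - remain) :: rest, answer)

def loopB : List (List String × List String) → List (String × Int) → List String →
    Option (List (String × Int) × List String)
  | [], stack, answer => some (stack, answer)
  | (cur, nxt) :: rest, stack, answer =>
    match PySem.Int.ofStr? (PySem.List.pyGetD cur 2 "") with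
    | none => none
    | some play =>
      match toMinB? (PySem.List.pyGetD nxt 1 ""), toMinB? (PySem.List.pyGetD cur 1 "") with
      | some tn, some tc =>
        match whileB ((PySem.List.pyGetD cur 0 "", play) :: stack) (tn - tc) answer with
        | (stack', answer') => loopB rest stack' answer'
      | _, _ => none

theorem preTimeOK_toMinB (x : List String) (h : preTimeOK x = true) :
    ∃ v, toMinB? (PySem.List.pyGetD x 1 "") = some v := by
  unfold preTimeOK at h
  unfold toMinB?
  rcases hm : ((PySem.Str.split? (PySem.List.pyGetD x 1 "") ":").getD []).mapM PySem.Int.ofStr? with _ | l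
  · rw [hm] at h; simp at h
  · rw [hm] at h
    match l with
    | [] => simp at h
    | [a] => simp at h
    | a :: b :: t => exact ⟨a * 60 + b, rfl⟩

theorem calcTimeA_eq (a b : String) (x y : Int)
    (ha : toMinB? a = some x) (hb : toMinB? b = some y) :
    calcTimeA? a b = some (y - x) := by
  unfold toMinB? at ha hb
  unfold calcTimeA?
  rcases hma : ((PySem.Str.split? a ":").getD []).mapM PySem.Int.ofStr? with _ | la
  · rw [hma] at ha; simp at ha
  · rw [hma] at ha
    rcases hmb : ((PySem.Str.split? b ":").getD []).mapM PySem.Int.ofStr? with _ | lb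
    · rw [hmb] at hb; simp at hb
    · rw [hmb] at hb
      match la, lb with
      | [], _ => simp at ha
      | [_], _ => simp at ha
      | _ :: _ :: _, [] => simp at hb
      | _ :: _ :: _, [_] => simp at hb
      | a0 :: a1 :: _, b0 :: b1 :: _ =>
        simp only [Option.some.injEq] at ha hb
        simp [ha, hb]

theorem innerEq (stack : List (String × Int)) :
    ∀ (term : Int) (answer : List String), 0 ≤ term → (∀ e ∈ stack, 0 < e.2) →
    (whileA stack term answer).1 = (whileB stack term answer).1 ∧
    (whileA stack term answer).2.2 = (whileB stack term answer).2 ∧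
    ∀ e ∈ (whileA stack term answer).1, 0 < e.2 := by
  induction stack with
  | nil => intro term answer _ _; simp [whileA, whileB]
  | cons hd rest ih =>
    intro term answer hterm hpos
    obtain ⟨nm, r⟩ := hd
    have hr : (0:Int) < r := hpos (nm, r) (by simp)
    have hrest : ∀ e ∈ rest, 0 < e.2 := fun e he => hpos e (by simp [he])
    by_cases h1 : r ≤ term
    · have h2 : (0:Int) < term := by omega
      have h3 : r - term ≤ 0 := by omega
      simp only [whileA, whileB, if_pos h2, if_pos h3, if_pos h1]
      have hneg : -(r - term) = term - r := by ring
      rw [hneg]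
      exact ih (term - r) (answer ++ [nm]) (by omega) hrest
    · by_cases h2 : (0:Int) < term
      · have h3 : ¬ r - term ≤ 0 := by omega
        simp only [whileA, whileB, if_pos h2, if_neg h3, if_neg h1]
        refine ⟨trivial, trivial, ?_⟩
        intro e he
        rcases List.mem_cons.mp he with he | he
        · subst he; simpa using by omega
        · exact hrest e he
      · have ht0 : term = 0 := by omega
        subst ht0
        simp only [whileA, whileB, if_neg h2, if_neg h1, sub_zero]
        refine ⟨trivial, trivial, ?_⟩
        intro e he
        rcases List.mem_cons.mp he with he | he
        · subst he; simpa using hr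
        · exact hrest e he

theorem mainEq (p : List (List String)) :
    ∀ (stack : List (String × Int)) (answer : List String),
    (∀ x ∈ p.dropLast, preFullOK x = true) →
    (∀ x ∈ p.tail, preTimeOK x = true) →
    (∀ e ∈ stack, 0 < e.2) →
    ∀ (h : p ≠ []),
    ∃ st ans, loopB (p.zip p.tail) stack answer = some (st, ans) ∧
      loopA p stack answer =
        some (ans ++ [PySem.List.pyGetD (p.getLast h) 0 ""] ++ st.map Prod.fst) := by
  induction p with
  | nil => intro _ _ _ _ _ h; exact absurd rfl h
  | cons cur rest ih =>
    intro stack answer hfull htime hpos h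
    cases rest with
    | nil => exact ⟨stack, answer, by simp [loopB], by simp [loopA]⟩
    | cons nxt rest' =>
      have hcur : preFullOK cur = true := hfull cur (by simp)
      unfold preFullOK at hcur
      rw [Bool.and_eq_true] at hcur
      have hcurT : preTimeOK cur = true := hcur.1
      obtain ⟨play, hplay⟩ := Option.isSome_iff_exists.mp hcur.2
      obtain ⟨tc, htc⟩ := preTimeOK_toMinB cur hcurT
      obtain ⟨tn, htn⟩ := preTimeOK_toMinB nxt (htime nxt (by simp))
      have hcalc := calcTimeA_eq _ _ _ _ htc htn
      have hfull' : ∀ x ∈ (nxt :: rest').dropLast, preFullOK x = true := by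
        intro x hx; exact hfull x (List.mem_cons_of_mem cur hx)
      have htime' : ∀ x ∈ (nxt :: rest').tail, preTimeOK x = true := by
        intro x hx; exact htime x (List.mem_cons_of_mem nxt hx)
      have hlast : (cur :: nxt :: rest').getLast h = (nxt :: rest').getLast (by simp) :=
        List.getLast_cons _
      by_cases hfit : play ≤ tn - tc
      · rcases hw : whileA stack (tn - tc - play) (answer ++ [PySem.List.pyGetD cur 0 ""])
          with ⟨stA, tA, ansA⟩
        have hinner := innerEq stack (tn - tc - play)
          (answer ++ [PySem.List.pyGetD cur 0 ""]) (by omega) hpos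
        rw [hw] at hinner
        obtain ⟨he1, he2, hposA⟩ := hinner
        obtain ⟨st, ans, hB, hA⟩ := ih stA ansA hfull' htime' hposA (by simp)
        refine ⟨st, ans, ?_, ?_⟩
        · simp only [List.tail_cons, List.zip_cons_cons, loopB, hplay, htn, htc, whileB, if_pos hfit]
          rw [← he1, ← he2]
          exact hB
        · simp only [loopA, hcalc, hplay, if_pos hfit, hw]
          rw [hA, hlast]
      · have hposS : ∀ e ∈ ((PySem.List.pyGetD cur 0 "", play - (tn - tc)) :: stack), 0 < e.2 := by
          intro e he
          rcases List.mem_cons.mp he with he | he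
          · subst he; simpa using by omega
          · exact hpos e he
        obtain ⟨st, ans, hB, hA⟩ := ih ((PySem.List.pyGetD cur 0 "", play - (tn - tc)) :: stack)
          answer hfull' htime' hposS (by simp)
        refine ⟨st, ans, ?_, ?_⟩
        · simp only [List.tail_cons, List.zip_cons_cons, loopB, hplay, htn, htc, whileB, if_neg hfit]
          exact hB
        · simp only [loopA, hcalc, hplay, if_neg hfit]
          rw [hA, hlast]

-- ===== bridge: the recursive port B equals the machine M =====

theorem fldB_eq (p : List (List String)) (i : Nat) (k : Int) (hi : i < p.length) :
    fldB p i k = PySem.List.pyGetD p[i] k "" := by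
  unfold fldB
  rw [PySem.List.pyGetD_natCast, List.getD_eq_getElem _ _ hi]

-- suspended recursive frames resumed in order: the defunctionalized continuation of Source B
def resumeFrames (p : List (List String)) (n : Nat) :
    List (String × Int) → Nat → Int → List String → Option (List String)
  | [], j, _, ans => runTopL p n j ans
  | (nm, r) :: rest, j, t, ans =>
    match execWhileL p n j t r ans with
    | none => none
    | some (j2, t2, r2, ans2) => resumeFrames p n rest j2 (t2 + r2) (ans2 ++ [nm])

theorem whileBound (p : List (List String)) (n : Nat) :
    ∀ (fm j : Nat), n - j ≤ fm → ∀ t rem ans j2 t2 r2 ans2,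
      execWhileL p n j t rem ans = some (j2, t2, r2, ans2) → j ≤ j2 := by
  intro fm
  induction fm with
  | zero =>
    intro j hj t rem ans j2 t2 r2 ans2 h
    rw [execWhileL] at h
    rw [dif_neg (by omega : ¬ j < n)] at h
    simp only [Option.some.injEq, Prod.mk.injEq] at h
    omega
  | succ fm ih =>
    intro j hj t rem ans j2 t2 r2 ans2 h
    rw [execWhileL] at h
    split at h
    · split at h
      · exact absurd h (by simp)
      · next s hs =>
          split at h
          · split at h
            · exact absurd h (by simp)
            · next j' t' ans' hgo =>
                split at h
                · next hjj => have := ih j' (by omega) _ _ _ _ _ _ _ h; omega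
                · exact absurd h (by simp)
          · simp only [Option.some.injEq, Prod.mk.injEq] at h
            omega
    · simp only [Option.some.injEq, Prod.mk.injEq] at h
      omega

theorem goBound (p : List (List String)) (n : Nat) (i : Nat) (t : Int) (ans : List String)
    (j : Nat) (t' : Int) (ans' : List String)
    (h : execGoL p n i t ans = some (j, t', ans')) : i < j := by
  rw [execGoL] at h
  split at h
  · next hlast =>
      simp only [Option.some.injEq, Prod.mk.injEq] at h
      omega
  · split at h
    · split at h
      · exact absurd h (by simp)
      · split at h
        · exact absurd h (by simp)
        · next j2 t2 r2 ans2 hw =>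
            simp only [Option.some.injEq, Prod.mk.injEq] at h
            have := whileBound p n (n - (i + 1)) (i + 1) (le_refl _) t _ ans j2 t2 r2 ans2 hw
            omega
    · exact absurd h (by simp)

theorem runTop_n (p : List (List String)) (n : Nat) (ans : List String) :
    runTopL p n n ans = some ans := by
  rw [runTopL]
  rw [dif_neg (by omega : ¬ ((n : Nat) : Int) < (n : Int) - 1)]
  rw [if_neg (by omega : ¬ ((n : Nat) : Int) = (n : Int) - 1)]

theorem drain (p : List (List String)) (n : Nat) :
    ∀ (st : List (String × Int)) (t : Int) (ans : List String),
      resumeFrames p n st n t ans = runTopL p n n (ans ++ st.map Prod.fst) := by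
  intro st
  induction st with
  | nil => intro t ans; simp [resumeFrames]
  | cons f rest ih =>
    intro t ans
    obtain ⟨nm, r⟩ := f
    show (match execWhileL p n n t r ans with
      | none => none
      | some (j2, t2, r2, ans2) => resumeFrames p n rest j2 (t2 + r2) (ans2 ++ [nm])) = _
    rw [execWhileL, dif_neg (by omega : ¬ n < n)]
    show resumeFrames p n rest n (t + r) (ans ++ [nm]) = _
    rw [ih]
    simp

theorem resumeFrames_cons (p : List (List String)) (n : Nat) (nm : String) (r : Int)
    (rest : List (String × Int)) (j : Nat) (t : Int) (ans : List String) :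
    resumeFrames p n ((nm, r) :: rest) j t ans =
      match execWhileL p n j t r ans with
      | none => none
      | some (j2, t2, r2, ans2) => resumeFrames p n rest j2 (t2 + r2) (ans2 ++ [nm]) := rfl

theorem pops (p : List (List String)) (n j : Nat) (s : Int) (hj : j < n)
    (hs : toMinB? (fldB p j 1) = some s) :
    ∀ (st : List (String × Int)) (t : Int) (ans : List String), t ≤ s →
      resumeFrames p n st j t ans =
        (match whileB st (s - t) ans with
         | ([], ans') => runTopL p n j ans'
         | (f :: st', ans') =>
           match execGoL p n j s ans' with
           | none => none
           | some (j', t', ans'') => resumeFrames p n (f :: st') j' t' ans'') := by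
  intro st
  induction st with
  | nil => intro t ans ht; simp [resumeFrames, whileB]
  | cons f rest ih =>
    intro t ans ht
    obtain ⟨nm, r⟩ := f
    by_cases hpop : r ≤ s - t
    · have hw : execWhileL p n j t r ans = some (j, t, r, ans) := by
        rw [execWhileL]
        simp [hj, hs, show ¬ s < t + r by omega]
      rw [resumeFrames_cons, hw]
      show resumeFrames p n rest j (t + r) (ans ++ [nm]) = _
      rw [ih (t + r) (ans ++ [nm]) (by omega)]
      rw [show whileB ((nm, r) :: rest) (s - t) ans = whileB rest ((s - t) - r) (ans ++ [nm]) from by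
        rw [whileB]; rw [if_pos hpop]]
      rw [show s - (t + r) = s - t - r from by ring]
    · have hlt : s < t + r := by omega
      have hwB : whileB ((nm, r) :: rest) (s - t) ans = ((nm, r - (s - t)) :: rest, ans) := by
        rw [whileB]; rw [if_neg hpop]
      rcases hgo : execGoL p n j s ans with _ | X
      · have hw : execWhileL p n j t r ans = none := by
          rw [execWhileL]; simp [hj, hs, hlt, hgo]
        rw [resumeFrames_cons, hw, hwB]
        show (none : Option (List String)) =
          match execGoL p n j s ans with
          | none => none
          | some (j', t', ans'') => resumeFrames p n ((nm, r - (s - t)) :: rest) j' t' ans''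
        rw [hgo]
      · obtain ⟨j', t', ans''⟩ := X
        have hjj : j < j' := goBound p n j s ans j' t' ans'' hgo
        have hw : execWhileL p n j t r ans = execWhileL p n j' t' (r - (s - t)) ans'' := by
          rw [execWhileL]; simp [hj, hs, hlt, hgo, hjj]
        rw [resumeFrames_cons, hw, hwB]
        show resumeFrames p n ((nm, r - (s - t)) :: rest) j' t' ans'' =
          match execGoL p n j s ans with
          | none => none
          | some (j', t', ans'') => resumeFrames p n ((nm, r - (s - t)) :: rest) j' t' ans''
        rw [hgo]

-- unfolding one step of Source B's top-level loop (for j ≤ n-1 with p[j][1] parseable)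
theorem topUnfold (p : List (List String)) (n j : Nat) (s : Int)
    (hj1 : (j : Int) ≤ (n : Int) - 1) (hs : toMinB? (fldB p j 1) = some s)
    (ans : List String) :
    runTopL p n j ans =
      (match execGoL p n j s ans with
       | none => none
       | some (j', _, ans') => runTopL p n j' ans') := by
  by_cases hlt : (j : Int) < (n : Int) - 1
  · rw [runTopL, dif_pos hlt, hs]
    rcases hgo : execGoL p n j s ans with _ | ⟨j', t', ans'⟩
    · simp [hgo]
    · simp [hgo, goBound p n j s ans j' t' ans' hgo]
  · have hj2 : (j : Int) = (n : Int) - 1 := by omega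
    rw [runTopL, dif_neg hlt, if_pos hj2]
    have hgo : execGoL p n j s ans = some (n, s, ans ++ [fldB p j 0]) := by
      rw [execGoL, if_pos hj2]
    rw [hgo]
    exact (runTop_n p n (ans ++ [fldB p j 0])).symm

-- the main induction: the recursive port, resumed through the suspended frames st,
-- computes exactly what the machine M computes from (tasks from k, stack st).
theorem big (p : List (List String))
    (H1 : ∀ x ∈ p.dropLast, preFullOK x = true)
    (H2 : ∀ x ∈ p, preTimeOK x = true) :
    ∀ (m k : Nat), k + m + 1 = p.length →
    ∀ (sk : Int), toMinB? (fldB p k 1) = some sk →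
    ∀ (st stf : List (String × Int)) (ans ansf : List String),
      loopB ((p.drop k).zip (p.drop k).tail) st ans = some (stf, ansf) →
      (match execGoL p p.length k sk ans with
       | none => none
       | some (j', t', ans') => resumeFrames p p.length st j' t' ans')
      = some (ansf ++ [fldB p (p.length - 1) 0] ++ stf.map Prod.fst) := by
  intro m
  induction m with
  | zero =>
    intro k hlen sk hsk st stf ans ansf hloop
    have hk : k < p.length := by omega
    have hdl : (p.drop k).length = 1 := by simp [List.length_drop]; omega
    have hzip : ((p.drop k).zip (p.drop k).tail) = [] := by
      rcases hdp : p.drop k with _ | ⟨a, l⟩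
      · rfl
      · rw [hdp] at hdl
        simp at hdl
        subst hdl
        simp
    rw [hzip] at hloop
    simp only [loopB, Option.some.injEq, Prod.mk.injEq] at hloop
    obtain ⟨hst, hans⟩ := hloop
    have hgo : execGoL p p.length k sk ans = some (p.length, sk, ans ++ [fldB p k 0]) := by
      rw [execGoL, if_pos (by omega : ((k : Nat) : Int) = (p.length : Int) - 1)]
    rw [hgo]
    show resumeFrames p p.length st p.length sk (ans ++ [fldB p k 0]) = _
    rw [drain, runTop_n]
    rw [← hst, ← hans, show k = p.length - 1 by omega]
  | succ m ih =>
    intro k hlen sk hsk st stf ans ansf hloop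
    have hk : k < p.length := by omega
    have hk1 : k + 1 < p.length := by omega
    -- the head pair of the remaining task list
    have hdk : p.drop k = p[k] :: p.drop (k + 1) := List.drop_eq_getElem_cons hk
    have hdk1 : p.drop (k + 1) = p[k + 1] :: p.drop (k + 2) := List.drop_eq_getElem_cons hk1
    have hzip : ((p.drop k).zip (p.drop k).tail) =
        (p[k], p[k + 1]) :: ((p.drop (k + 1)).zip (p.drop (k + 1)).tail) := by
      rw [hdk, List.tail_cons, hdk1, List.zip_cons_cons, List.tail_cons]
    -- parse facts for the head pair
    have hmemdl : p[k] ∈ p.dropLast := by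
      have hkdl : k < p.dropLast.length := by simp [List.length_dropLast]; omega
      have := List.getElem_mem hkdl
      rwa [List.getElem_dropLast] at this
    have hcurF := H1 _ hmemdl
    unfold preFullOK at hcurF
    rw [Bool.and_eq_true] at hcurF
    obtain ⟨play, hplay⟩ := Option.isSome_iff_exists.mp hcurF.2
    obtain ⟨tn, htn⟩ := preTimeOK_toMinB p[k + 1] (H2 _ (List.getElem_mem hk1))
    have hskg : toMinB? (PySem.List.pyGetD p[k] 1 "") = some sk := by
      rw [← fldB_eq p k 1 hk]; exact hsk
    have hsk' : toMinB? (fldB p (k + 1) 1) = some tn := by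
      rw [fldB_eq p (k + 1) 1 hk1]; exact htn
    -- unfold one step of the machine
    rw [hzip] at hloop
    simp only [loopB, hplay, htn, hskg] at hloop
    -- unfold one step of the recursive port
    have hwgo : execGoL p p.length k sk ans =
        (match execWhileL p p.length (k + 1) sk play ans with
         | none => none
         | some (j2, t2, r2, ans2) => some (j2, t2 + r2, ans2 ++ [fldB p k 0])) := by
      rw [execGoL, if_neg (by omega : ¬ ((k : Nat) : Int) = (p.length : Int) - 1),
        dif_pos hk, fldB_eq p k 2 hk, hplay]
    have hnm : fldB p k 0 = PySem.List.pyGetD p[k] 0 "" := fldB_eq p k 0 hk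
    by_cases hfit : play ≤ tn - sk
    · -- task k fits before task k+1 starts: the while loop is not entered
      have hwl : execWhileL p p.length (k + 1) sk play ans = some (k + 1, sk, play, ans) := by
        rw [execWhileL, dif_pos hk1, hsk']
        simp [show ¬ tn < sk + play by omega]
      have hgo : execGoL p p.length k sk ans =
          some (k + 1, sk + play, ans ++ [fldB p k 0]) := by rw [hwgo, hwl]
      rw [hgo]
      show resumeFrames p p.length st (k + 1) (sk + play) (ans ++ [fldB p k 0]) = _
      -- machine side: pop the pushed frame, then drain the stack over the rest of the gap
      rw [show whileB ((PySem.List.pyGetD p[k] 0 "", play) :: st) (tn - sk) ans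
            = whileB st (tn - sk - play) (ans ++ [PySem.List.pyGetD p[k] 0 ""]) from by
        rw [whileB, if_pos hfit]] at hloop
      rcases hw2 : whileB st (tn - sk - play) (ans ++ [PySem.List.pyGetD p[k] 0 ""])
        with ⟨st1, ans1⟩
      rw [hw2] at hloop
      rw [pops p p.length (k + 1) tn hk1 hsk' st (sk + play) (ans ++ [fldB p k 0]) (by omega)]
      rw [hnm, show tn - (sk + play) = tn - sk - play by ring, hw2]
      rcases st1 with _ | ⟨f1, st1'⟩
      · -- stack emptied: continue at the top level
        show runTopL p p.length (k + 1) ans1 = _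
        rw [topUnfold p p.length (k + 1) tn (by omega) hsk' ans1]
        have := ih (k + 1) (by omega) tn hsk' [] stf ans1 ansf hloop
        rcases hgo2 : execGoL p p.length (k + 1) tn ans1 with _ | ⟨j2, t2, ans2⟩ <;>
          (rw [hgo2] at this; exact this)
      · -- stack still non-empty: its top was charged, continue with task k+1
        show (match execGoL p p.length (k + 1) tn ans1 with
          | none => none
          | some (j', t', ans') => resumeFrames p p.length (f1 :: st1') j' t' ans') = _
        exact ih (k + 1) (by omega) tn hsk' (f1 :: st1') stf ans1 ansf hloop
    · -- task k is preempted: pushed (charged) and task k+1 recursed into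
      have hlt : tn < sk + play := by omega
      rw [show whileB ((PySem.List.pyGetD p[k] 0 "", play) :: st) (tn - sk) ans
            = ((PySem.List.pyGetD p[k] 0 "", play - (tn - sk)) :: st, ans) from by
        rw [whileB, if_neg hfit]] at hloop
      have ihx := ih (k + 1) (by omega) tn hsk'
        ((PySem.List.pyGetD p[k] 0 "", play - (tn - sk)) :: st) stf ans ansf hloop
      rcases hgo2 : execGoL p p.length (k + 1) tn ans with _ | ⟨j2, t2, ans2⟩
      · rw [hgo2] at ihx
        simp at ihx
      · have hjj : k + 1 < j2 := goBound p p.length (k + 1) tn ans j2 t2 ans2 hgo2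
        have hwl : execWhileL p p.length (k + 1) sk play ans =
            execWhileL p p.length j2 t2 (play - (tn - sk)) ans2 := by
          rw [execWhileL, dif_pos hk1, hsk']
          simp [hlt, hgo2, hjj]
        have ih' : resumeFrames p p.length
            ((PySem.List.pyGetD p[k] 0 "", play - (tn - sk)) :: st) j2 t2 ans2
            = some (ansf ++ [fldB p (p.length - 1) 0] ++ stf.map Prod.fst) := by
          rw [hgo2] at ihx; exact ihx
        rw [hwgo, hwl, ← ih', resumeFrames_cons, hnm]
        rcases hwl2 : execWhileL p p.length j2 t2 (play - (tn - sk)) ans2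
          with _ | ⟨a, b, c, d⟩ <;> rfl

-- ===== VERDICT (by name: the statement is the Claim_ definition above) =====
theorem solution_spec : Claim_equal_solution := by
  intro plans _ hPre
  obtain ⟨hne, _, hrest⟩ := hPre
  unfold Spec_solution solution solution_alt
  set p := PySem.List.sorted plans (fun x => (PySem.List.pyGetD x 1 "").toList) false with hp
  have hpne : p ≠ [] := by
    intro hnil
    exact hne ((PySem.List.sorted_eq_nil_iff _ _ _).mp hnil)
  have hlen : p.length = plans.length := by
    rw [hp]; exact (PySem.List.sorted_perm _ _ _).length_eq
  have hpos : 0 < p.length := List.length_pos_iff.mpr hpne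
  have H1 : ∀ x ∈ p.dropLast, preFullOK x = true := by
    intro x hx
    rcases Nat.lt_or_ge plans.length 2 with hl | hl
    · exfalso
      have : p.dropLast = [] := by
        apply List.eq_nil_of_length_eq_zero
        rw [List.length_dropLast]; omega
      rw [this] at hx; simp at hx
    · exact (hrest hl).2 x hx
  have H2t : ∀ x ∈ p.tail, preTimeOK x = true := by
    intro x hx
    rcases Nat.lt_or_ge plans.length 2 with hl | hl
    · exfalso
      have : p.tail = [] := by
        apply List.eq_nil_of_length_eq_zero
        rw [List.length_tail]; omega
      rw [this] at hx; simp at hx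
    · exact (hrest hl).1 x
        ((PySem.List.mem_sorted _ _ _ _).mp (List.mem_of_mem_tail hx))
  obtain ⟨st, ans, hB, hA⟩ := mainEq p [] [] H1 H2t (by simp) hpne
  rw [hA]
  show (some (ans ++ [PySem.List.pyGetD (p.getLast hpne) 0 ""] ++ List.map Prod.fst st)).getD []
      = (runTopL p p.length 0 []).getD []
  rw [Option.getD_some]
  symm
  rcases Nat.lt_or_ge p.length 2 with hn1 | hn2
  · -- a single plan: both sides are just its name
    have h1 : p.length = 1 := by omega
    have hzip : p.zip p.tail = [] := by
      rcases hdp : p with _ | ⟨a, l⟩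
      · rfl
      · rw [hdp] at h1
        simp at h1
        subst h1
        rfl
    rw [hzip] at hB
    simp only [loopB, Option.some.injEq, Prod.mk.injEq] at hB
    obtain ⟨hst, hans⟩ := hB
    have htop : runTopL p p.length 0 [] = some ([] ++ [fldB p 0 0]) := by
      rw [runTopL, dif_neg (by omega : ¬ ((0 : Nat) : Int) < (p.length : Int) - 1),
        if_pos (by omega : ((0 : Nat) : Int) = (p.length : Int) - 1)]
    rw [htop]
    rw [← hst, ← hans, fldB_eq p 0 0 hpos]
    simp [List.getLast_eq_getElem, show p.length - 1 = 0 by omega]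
  · -- at least two plans: the main induction applies from index 0
    have H2 : ∀ x ∈ p, preTimeOK x = true := by
      intro x hx
      exact (hrest (by omega)).1 x ((PySem.List.mem_sorted _ _ _ _).mp hx)
    obtain ⟨s0, hs0g⟩ := preTimeOK_toMinB p[0] (H2 _ (List.getElem_mem hpos))
    have hs0 : toMinB? (fldB p 0 1) = some s0 := by
      rw [fldB_eq p 0 1 hpos]
      exact hs0g
    have hloop0 : loopB ((p.drop 0).zip (p.drop 0).tail) [] [] = some (st, ans) := by
      rw [List.drop_zero]; exact hB
    have hbig := big p H1 H2 (p.length - 1) 0 (by omega) s0 hs0 [] st [] ans hloop0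
    rw [topUnfold p p.length 0 s0 (by omega) hs0 []]
    rcases hgo0 : execGoL p p.length 0 s0 [] with _ | ⟨j0, t0, ans0⟩
    · rw [hgo0] at hbig
      simp at hbig
    · rw [hgo0] at hbig
      have hbig' : runTopL p p.length j0 ans0
          = some (ans ++ [fldB p (p.length - 1) 0] ++ st.map Prod.fst) := hbig
      show (runTopL p p.length j0 ans0).getD [] = _
      rw [hbig', fldB_eq p (p.length - 1) 0 (by omega)]
      simp [List.getLast_eq_getElem]
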